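-- pv_equiv track=rewrite | github.com/JohnSmithDev/GRAnalysis | utils/tsundoku.py | calculate_x_positions
-- ===== SOURCE A (Python) =====
-- def calculate_x_positions(count_data, offset=0):
--     """
--     Given a list of (presumably) Counts ordered in (roughly) descending order
--     return a list of the indices to that list in a "mountain" esque form i.e.
--     with the biggest ones in the middle, going down as you go further out to
--     the start or end of the list.  Also keeps like 'keys' grouped with like.
--
--     (You can pass this an unordered list, but the return value probably
--      won't be terribly useful/interesting.)
--
--     >>> calculate_x_positions(Count('a', 10), Count('b', 8), Count('c', 6), 3)
--     [4, 3, 5]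
--
--     """
--     right = 1
--     left = 0
--     currently_going_right = False
--     prev_key = None
--
--     temp_positions = []
--     for k, _  in count_data:
--         if k == prev_key:
--             if currently_going_right:
--                 temp_positions.append(right)
--                 right += 1
--             else:
--                 temp_positions.append(left)
--                 left -= 1
--         else:
--             currently_going_right = not currently_going_right
--             if currently_going_right:
--                 temp_positions.append(right)
--                 right += 1
--             else:
--                 temp_positions.append(left)
--                 left -= 1
--         prev_key = k
--     return [z - left -1 + offset for z in temp_positions]
-- ===== SOURCE B (Python) =====
-- from collections import deque
--
-- def calculate_x_positions(count_data, offset=0):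
--     dq = deque()
--     going_right = False
--     prev_key = None
--     for i, (k, _) in enumerate(count_data):
--         if k != prev_key:
--             going_right = not going_right
--         if going_right:
--             dq.append(i)
--         else:
--             dq.appendleft(i)
--         prev_key = k
--     result = [0] * len(count_data)
--     for pos, idx in enumerate(dq):
--         result[idx] = pos + offset
--     return result
-- ===== Notes on version B (the rewrite author's own statement) =====
-- stated objective: alternative
-- what changed: B builds a deque of element indices (append when going right, appendleft when going left) and then assigns result[idx] = pos + offset from the deque order, replacing A's two running counters plus the final normalization pass over raw positions.
import Mathlib
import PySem

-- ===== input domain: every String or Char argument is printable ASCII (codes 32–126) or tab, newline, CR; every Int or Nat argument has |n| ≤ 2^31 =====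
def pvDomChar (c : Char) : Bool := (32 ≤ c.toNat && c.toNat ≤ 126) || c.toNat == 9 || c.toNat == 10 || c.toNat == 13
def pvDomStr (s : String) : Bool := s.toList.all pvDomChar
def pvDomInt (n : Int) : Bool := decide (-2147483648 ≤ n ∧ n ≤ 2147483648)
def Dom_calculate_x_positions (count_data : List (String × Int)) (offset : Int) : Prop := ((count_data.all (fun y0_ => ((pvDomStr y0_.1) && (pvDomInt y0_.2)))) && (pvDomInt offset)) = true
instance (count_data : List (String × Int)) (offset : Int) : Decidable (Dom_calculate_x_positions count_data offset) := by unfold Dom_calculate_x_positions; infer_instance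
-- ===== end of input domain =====

-- B replaces A's two running counters + final normalization pass by a deque of
-- indices built left/right plus an index-mapping pass (objective: alternative).

-- ===== PORT A =====
-- the for-loop of A: state (right, left, currently_going_right, prev_key, temp_positions);
-- returns the final (left, temp_positions)
def pvALoop : List (String × Int) → Int → Int → Bool → Option String → List Int → Int × List Int
  | [], _, left, _, _, temp => (left, temp)
  | (k, _) :: t, right, left, going, prev, temp =>
    if some k = prev then
      if going then pvALoop t (right + 1) left going (some k) (temp ++ [right])
      else pvALoop t right (left - 1) going (some k) (temp ++ [left])
    else
      let going := !going
      if going then pvALoop t (right + 1) left going (some k) (temp ++ [right])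
      else pvALoop t right (left - 1) going (some k) (temp ++ [left])

def calculate_x_positions (count_data : List (String × Int)) (offset : Int) : List Int :=
  let r := pvALoop count_data 1 0 false none []
  r.2.map (fun z => z - r.1 - 1 + offset)

-- ===== PORT B =====
-- first loop of B: for i, (k, _) in enumerate(count_data): toggle on key change,
-- dq.append(i) going right / dq.appendleft(i) going left; returns the deque
def pvDequeLoop : List (String × Int) → Int → Bool → Option String → List Int → List Int
  | [], _, _, _, dq => dq
  | (k, _) :: t, i, going, prev, dq =>
    let going := if some k ≠ prev then !going else going
    if going then pvDequeLoop t (i + 1) going (some k) (dq ++ [i])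
    else pvDequeLoop t (i + 1) going (some k) (i :: dq)

-- second loop of B: for pos, idx in enumerate(dq): result[idx] = pos + offset
def pvWriteLoop (offset : Int) : List Int → Int → List Int → List Int
  | [], _, res => res
  | i :: t, pos, res => pvWriteLoop offset t (pos + 1) (PySem.List.pySetD res i (pos + offset))

def calculate_x_positions_alt (count_data : List (String × Int)) (offset : Int) : List Int :=
  let dq := pvDequeLoop count_data 0 false none []
  pvWriteLoop offset dq 0 (List.replicate count_data.length 0)

-- ===== PRECONDITION & SPEC =====
def Spec_calculate_x_positions (count_data : List (String × Int)) (offset : Int) (out : List Int) : Prop := out = calculate_x_positions_alt count_data offset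
instance (count_data : List (String × Int)) (offset : Int) (out : List Int) : Decidable (Spec_calculate_x_positions count_data offset out) := by unfold Spec_calculate_x_positions; infer_instance

-- ===== CLAIM (what is proved, stated in full; the proofs are below) =====
def Claim_equal_calculate_x_positions : Prop := ∀ (count_data : List (String × Int)) (offset : Int), Dom_calculate_x_positions count_data offset → Spec_calculate_x_positions count_data offset (calculate_x_positions count_data offset)

-- ===== LEMMAS AND PROOFS =====

-- invariant linking A's loop state to B's deque: deque position p holds the index
-- of the temp entry whose raw value is p + left + 1
def pvInv (left : Int) (temp dq : List Int) : Prop :=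
  dq.length = temp.length ∧
  ∀ pos : Nat, ∀ j : Int, dq[pos]? = some j →
    ∃ jn : Nat, j = (jn : Int) ∧ jn < temp.length ∧ temp[jn]? = some ((pos : Int) + left + 1)

theorem pvALoop_len : ∀ (cd : List (String × Int)) r l g p temp,
    (pvALoop cd r l g p temp).2.length = temp.length + cd.length := by
  intro cd
  induction cd with
  | nil => intro r l g p temp; simp [pvALoop]
  | cons hd t ih =>
    intro r l g p temp
    obtain ⟨k, c⟩ := hd
    simp only [pvALoop]
    split_ifs <;> rw [ih] <;> simp <;> omega

theorem pvInv_step : ∀ (cd : List (String × Int)) (l : Int) g p (temp dq : List Int),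
    pvInv l temp dq →
    pvInv (pvALoop cd (l + temp.length + 1) l g p temp).1
          (pvALoop cd (l + temp.length + 1) l g p temp).2
          (pvDequeLoop cd (temp.length : Int) g p dq) := by
  intro cd
  induction cd with
  | nil => intro l g p temp dq h; simpa [pvALoop, pvDequeLoop] using h
  | cons hd t ih =>
    intro l g p temp dq h
    obtain ⟨hlen, hrel⟩ := h
    obtain ⟨k, c⟩ := hd
    have hR : pvInv l (temp ++ [l + temp.length + 1]) (dq ++ [(temp.length : Int)]) := by
      constructor
      · simp [hlen]
      · intro pos j hget
        rcases Nat.lt_trichotomy pos dq.length with hp | hp | hp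
        · rw [List.getElem?_append_left hp] at hget
          obtain ⟨jn, rfl, hjn, hv⟩ := hrel pos j hget
          exact ⟨jn, rfl, by simp; omega, by rw [List.getElem?_append_left hjn]; exact hv⟩
        · subst hp
          rw [List.getElem?_concat_length] at hget
          refine ⟨temp.length, by simpa using hget.symm, by simp, ?_⟩
          rw [hlen, List.getElem?_concat_length]
          congr 1
          omega
        · rw [List.getElem?_eq_none (by simp; omega)] at hget
          exact absurd hget (by simp)
    have hL : pvInv (l - 1) (temp ++ [l]) ((temp.length : Int) :: dq) := by
      constructor
      · simp [hlen]
      · intro pos j hget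
        cases pos with
        | zero =>
          simp at hget
          refine ⟨temp.length, hget.symm, by simp, ?_⟩
          rw [List.getElem?_concat_length]
          congr 1
          omega
        | succ q =>
          simp only [List.getElem?_cons_succ] at hget
          obtain ⟨jn, rfl, hjn, hv⟩ := hrel q j hget
          exact ⟨jn, rfl, by simp; omega, by
            rw [List.getElem?_append_left hjn, hv]; congr 1; push_cast; ring⟩
    have hRcont : pvInv (pvALoop t (l + ↑temp.length + 1 + 1) l true (some k) (temp ++ [l + ↑temp.length + 1])).1
        (pvALoop t (l + ↑temp.length + 1 + 1) l true (some k) (temp ++ [l + ↑temp.length + 1])).2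
        (pvDequeLoop t ((temp.length : Int) + 1) true (some k) (dq ++ [(temp.length : Int)])) := by
      have h1 : l + (((temp ++ [l + ↑temp.length + 1]).length : Nat) : Int) + 1 = l + ↑temp.length + 1 + 1 := by
        simp only [List.length_append, List.length_singleton]; push_cast; ring
      have h2 : (((temp ++ [l + ↑temp.length + 1]).length : Nat) : Int) = (temp.length : Int) + 1 := by
        simp only [List.length_append, List.length_singleton]; push_cast; ring
      have := ih l true (some k) (temp ++ [l + ↑temp.length + 1]) (dq ++ [(temp.length : Int)]) hR
      rw [h1, h2] at this
      exact this
    have hLcont : pvInv (pvALoop t (l + ↑temp.length + 1) (l - 1) false (some k) (temp ++ [l])).1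
        (pvALoop t (l + ↑temp.length + 1) (l - 1) false (some k) (temp ++ [l])).2
        (pvDequeLoop t ((temp.length : Int) + 1) false (some k) ((temp.length : Int) :: dq)) := by
      have h1 : l - 1 + (((temp ++ [l]).length : Nat) : Int) + 1 = l + ↑temp.length + 1 := by
        simp only [List.length_append, List.length_singleton]; push_cast; ring
      have h2 : (((temp ++ [l]).length : Nat) : Int) = (temp.length : Int) + 1 := by
        simp only [List.length_append, List.length_singleton]; push_cast; ring
      have := ih (l - 1) false (some k) (temp ++ [l]) ((temp.length : Int) :: dq) hL
      rw [h1, h2] at this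
      exact this
    simp only [pvALoop, pvDequeLoop]
    by_cases hk : some k = p
    · subst hk
      simp only [ne_eq, not_true_eq_false, if_false]
      cases g with
      | true => simpa using hRcont
      | false => simpa using hLcont
    · simp only [ne_eq, hk, not_false_eq_true, if_true, if_false]
      cases g with
      | false => simpa using hRcont
      | true => simpa using hLcont

theorem pvWriteLoop_len (offset : Int) : ∀ (dq : List Int) (s : Int) (res : List Int),
    (pvWriteLoop offset dq s res).length = res.length := by
  intro dq
  induction dq with
  | nil => intro s res; simp [pvWriteLoop]
  | cons i t ih => intro s res; simp [pvWriteLoop, ih, PySem.List.length_pySetD]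

theorem pvWriteLoop_untouched (offset : Int) : ∀ (dq : List Int) (s : Int) (res : List Int) (jn : Nat),
    (∀ x ∈ dq, ∃ m : Nat, x = (m : Int)) → (jn : Int) ∉ dq →
    (pvWriteLoop offset dq s res)[jn]? = res[jn]? := by
  intro dq
  induction dq with
  | nil => intro s res jn _ _; simp [pvWriteLoop]
  | cons i t ih =>
    intro s res jn hnat hnot
    obtain ⟨m, rfl⟩ := hnat _ (List.mem_cons_self ..)
    simp only [pvWriteLoop]
    rw [ih (s + 1) _ jn (fun x hx => hnat x (List.mem_cons_of_mem _ hx))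
        (fun hmem => hnot (List.mem_cons_of_mem _ hmem))]
    rw [PySem.List.pySetD_natCast]
    have hne : m ≠ jn := fun he => hnot (by simp [he])
    rw [List.getElem?_set_ne (by exact_mod_cast hne)]

theorem pvWriteLoop_get (offset : Int) : ∀ (dq : List Int) (pos : Nat) (s : Int) (res : List Int) (jn : Nat),
    jn < res.length →
    (∀ x ∈ dq, ∃ m : Nat, x = (m : Int)) →
    dq[pos]? = some ((jn : Int)) →
    (∀ p' : Nat, dq[p']? = some ((jn : Int)) → p' = pos) →
    (pvWriteLoop offset dq s res)[jn]? = some ((pos : Int) + s + offset) := by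
  intro dq
  induction dq with
  | nil => intro pos s res jn _ _ hget _; simp at hget
  | cons i t ih =>
    intro pos s res jn hlen hnat hget huniq
    cases pos with
    | zero =>
      simp only [List.getElem?_cons_zero, Option.some_inj] at hget
      subst hget
      simp only [pvWriteLoop]
      have hnott : ((jn : Int)) ∉ t := by
        intro hmem
        obtain ⟨p', hp'⟩ := List.getElem?_of_mem hmem
        exact Nat.succ_ne_zero p' (huniq (p' + 1) (by simpa using hp'))
      rw [pvWriteLoop_untouched offset t (s + 1) _ jn
          (fun x hx => hnat x (List.mem_cons_of_mem _ hx)) hnott]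
      rw [PySem.List.pySetD_natCast, List.getElem?_set_self hlen]
      congr 1
      simp
    | succ q =>
      simp only [List.getElem?_cons_succ] at hget
      obtain ⟨m, rfl⟩ := hnat _ (List.mem_cons_self ..)
      have hne : m ≠ jn := by
        intro he
        exact Nat.succ_ne_zero q ((huniq 0 (by simp [he])).symm ▸ rfl)
      simp only [pvWriteLoop]
      rw [PySem.List.pySetD_natCast]
      have := ih q (s + 1) (res.set m (s + offset)) jn (by simpa using hlen)
        (fun x hx => hnat x (List.mem_cons_of_mem _ hx)) hget
        (fun p' hp' => Nat.succ_injective (huniq (p' + 1) (by simpa using hp')))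
      rw [this]
      congr 1
      push_cast
      ring

-- ===== VERDICT (by name: the statement is the Claim_ definition above) =====
theorem calculate_x_positions_spec : Claim_equal_calculate_x_positions := by
  intro cd offset _
  unfold Spec_calculate_x_positions calculate_x_positions calculate_x_positions_alt
  have hinv0 : pvInv 0 ([] : List Int) ([] : List Int) := ⟨rfl, by intro pos j h; simp at h⟩
  have hinv := pvInv_step cd 0 false none [] [] hinv0
  simp only [List.length_nil, Nat.cast_zero, zero_add] at hinv
  set l := (pvALoop cd 1 0 false none []).1 with hl
  set temp := (pvALoop cd 1 0 false none []).2 with htemp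
  set dq := pvDequeLoop cd 0 false none [] with hdq
  obtain ⟨hlen, hrel⟩ := hinv
  have hn : temp.length = cd.length := by
    rw [htemp, pvALoop_len]; simp
  -- surjectivity: every index jn < n appears in dq at exactly one position
  have hinj : Function.Injective (fun pos : Fin dq.length =>
      (⟨(dq[pos]).toNat, by
          obtain ⟨jn, hj, hjn, _⟩ := hrel pos dq[pos] (List.getElem?_eq_getElem pos.2)
          simpa [hj] using hjn⟩ : Fin temp.length)) := by
    intro p1 p2 he
    obtain ⟨j1, hj1, hjn1, hv1⟩ := hrel p1 dq[p1] (List.getElem?_eq_getElem p1.2)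
    obtain ⟨j2, hj2, hjn2, hv2⟩ := hrel p2 dq[p2] (List.getElem?_eq_getElem p2.2)
    have hfin : j1 = j2 := by
      have := congrArg Fin.val he
      simpa [hj1, hj2] using this
    rw [hfin] at hv1
    rw [hv1] at hv2
    have : (p1 : Int) = (p2 : Int) := by
      have := Option.some_inj.mp hv2
      omega
    exact Fin.ext (by exact_mod_cast this)
  have hsurj : Function.Surjective (fun pos : Fin dq.length =>
      (⟨(dq[pos]).toNat, by
          obtain ⟨jn, hj, hjn, _⟩ := hrel pos dq[pos] (List.getElem?_eq_getElem pos.2)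
          simpa [hj] using hjn⟩ : Fin temp.length)) := by
    exact ((Fintype.bijective_iff_injective_and_card _).mpr ⟨hinj, by simp [hlen]⟩).surjective
  apply List.ext_getElem?
  intro jn
  by_cases hjn : jn < cd.length
  · obtain ⟨pos, hpos⟩ := hsurj ⟨jn, by omega⟩
    have hval : (dq[pos.1]).toNat = jn := by simpa using congrArg Fin.val hpos
    have hposget : dq[pos.1]? = some ((jn : Int)) := by
      obtain ⟨m, hm, _, _⟩ := hrel pos.1 dq[pos.1] (List.getElem?_eq_getElem pos.2)
      rw [List.getElem?_eq_getElem pos.2]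
      congr 1
      omega
    have huniq : ∀ p' : Nat, dq[p']? = some ((jn : Int)) → p' = pos.1 := by
      intro p' hp'
      have hp'lt : p' < dq.length := by
        by_contra hge
        rw [List.getElem?_eq_none (by omega)] at hp'
        exact absurd hp' (by simp)
      obtain ⟨j1, hj1, hjn1, hv1⟩ := hrel p' _ hp'
      obtain ⟨j2, hj2, hjn2, hv2⟩ := hrel pos.1 _ hposget
      have : j1 = j2 := by omega
      rw [this] at hv1
      rw [hv1] at hv2
      have := Option.some_inj.mp hv2
      omega
    have hnat : ∀ x ∈ dq, ∃ m : Nat, x = (m : Int) := by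
      intro x hx
      obtain ⟨p', hp'⟩ := List.getElem?_of_mem hx
      obtain ⟨m, hm, _, _⟩ := hrel p' x hp'
      exact ⟨m, hm⟩
    rw [pvWriteLoop_get offset dq pos.1 0 _ jn (by simp [hjn]) hnat hposget huniq]
    obtain ⟨j2, hj2, hjn2, hv2⟩ := hrel pos.1 _ hposget
    have hj2' : j2 = jn := by omega
    rw [hj2'] at hv2
    rw [List.getElem?_map, hv2]
    simp only [Option.map_some, Option.some_inj]
    ring
  · rw [List.getElem?_eq_none (by rw [List.length_map, hn]; omega),
        List.getElem?_eq_none (by rw [pvWriteLoop_len, List.length_replicate]; omega)]
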